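-- pv_equiv track=rewrite | github.com/nambroa/Algorithms-and-Data-Structures | strings/O_reverse_the_string/algorithm.py | get_first_index_from_the_end_that_isnt_a_space
-- ===== SOURCE A (Python) =====
-- def is_space_character(char):
--     return ord(char) == 32
--
-- def get_first_index_from_the_end_that_isnt_a_space(A):
--     index = len(A) - 1
--     for i in range(len(A) - 1, -1, -1):
--         char = A[i]
--         if is_space_character(char):
--             index -= 1
--         else:
--             # I finish since I found my first letter.
--             break
--     return index
-- ===== SOURCE B (Python) =====
-- def get_first_index_from_the_end_that_isnt_a_space(A):
--     # idiomatic: strip only ASCII spaces from the right, index of last kept char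
--     return len(A.rstrip(' ')) - 1
-- ===== Notes on version B (the rewrite author's own statement) =====
-- stated objective: idiomatic
-- what changed: Replaces the manual reverse index loop with a single library call: len(A.rstrip(' ')) - 1, computing the answer from the stripped length instead of decrementing a counter.
import Mathlib
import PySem

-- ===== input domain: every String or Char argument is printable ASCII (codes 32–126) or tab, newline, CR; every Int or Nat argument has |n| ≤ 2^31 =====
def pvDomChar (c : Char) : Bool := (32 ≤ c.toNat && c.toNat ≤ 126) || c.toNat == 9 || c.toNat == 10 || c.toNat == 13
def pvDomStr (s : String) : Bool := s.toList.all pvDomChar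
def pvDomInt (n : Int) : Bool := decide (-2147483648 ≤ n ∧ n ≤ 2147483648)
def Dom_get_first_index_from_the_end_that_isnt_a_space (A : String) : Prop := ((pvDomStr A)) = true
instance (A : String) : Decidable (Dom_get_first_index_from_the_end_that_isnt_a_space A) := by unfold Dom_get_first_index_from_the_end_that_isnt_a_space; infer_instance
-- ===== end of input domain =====

-- B replaces A's manual reverse scan with the stripped length: len(A.rstrip(' ')) - 1 (idiomatic, same cost).

-- ===== PORT A =====
def is_space_character (char : Char) : Bool := char.toNat == 32

-- the for-loop with its break: recursion over the index list, carrying `index`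
def pvA_loop (A : List Char) (idxs : List Int) (index : Int) : Int :=
  match idxs with
  | [] => index
  | i :: rest =>
    match PySem.List.pyGet? A i with
    | none => index          -- unreachable: every index of range(len(A)-1, -1, -1) is in bounds
    | some char =>
      if is_space_character char then pvA_loop A rest (index - 1)
      else index             -- break

def get_first_index_from_the_end_that_isnt_a_space (A : String) : Int :=
  pvA_loop A.toList (PySem.List.pyRange ((A.toList.length : Int) - 1) (-1) (-1))
    ((A.toList.length : Int) - 1)

-- ===== PORT B =====
-- exact hand port of str.rstrip(' '): remove trailing U+0020 characters only
def pvB_rstripSpaces (cs : List Char) : List Char :=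
  (cs.reverse.dropWhile (fun c => c == ' ')).reverse

def get_first_index_from_the_end_that_isnt_a_space_alt (A : String) : Int :=
  ((pvB_rstripSpaces A.toList).length : Int) - 1

-- ===== PRECONDITION & SPEC =====
def Spec_get_first_index_from_the_end_that_isnt_a_space (A : String) (out : Int) : Prop := out = get_first_index_from_the_end_that_isnt_a_space_alt A
instance (A : String) (out : Int) : Decidable (Spec_get_first_index_from_the_end_that_isnt_a_space A out) := by unfold Spec_get_first_index_from_the_end_that_isnt_a_space; infer_instance

-- ===== CLAIM (what is proved, stated in full; the proofs are below) =====
def Claim_equal_get_first_index_from_the_end_that_isnt_a_space : Prop := ∀ (A : String), Dom_get_first_index_from_the_end_that_isnt_a_space A → Spec_get_first_index_from_the_end_that_isnt_a_space A (get_first_index_from_the_end_that_isnt_a_space A)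

-- ===== LEMMAS AND PROOFS =====

lemma beq_space_eq (c : Char) : (c == ' ') = (c.toNat == 32) := by
  by_cases h : c = ' '
  · subst h; decide
  · have hn : c.toNat ≠ 32 := by
      intro hn
      exact h (Char.ext (UInt32.toNat_inj.mp (hn.trans (by decide))))
    simp [h, hn]

-- appending one char does not change the loop while all indices stay inside ys
lemma pvA_loop_append (ys : List Char) (c : Char) (idxs : List Int)
    (h : ∀ i ∈ idxs, 0 ≤ i ∧ i < (ys.length : Int)) (idx : Int) :
    pvA_loop (ys ++ [c]) idxs idx = pvA_loop ys idxs idx := by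
  induction idxs generalizing idx with
  | nil => rfl
  | cons i rest ih =>
    obtain ⟨h0, hlt⟩ := h i (List.mem_cons_self ..)
    have hi : i.toNat < ys.length := by omega
    have hget : PySem.List.pyGet? (ys ++ [c]) i = PySem.List.pyGet? ys i := by
      rw [PySem.List.pyGet?_of_nonneg _ h0, PySem.List.pyGet?_of_nonneg _ h0,
        List.getElem?_append_left hi]
    simp only [pvA_loop, hget]
    cases PySem.List.pyGet? ys i with
    | none => rfl
    | some ch =>
      by_cases hs : is_space_character ch = true
      · simp only [hs, if_true]
        exact ih (fun j hj => h j (List.mem_cons_of_mem _ hj)) _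
      · simp [hs]

lemma key (cs : List Char) :
    pvA_loop cs (PySem.List.pyRange ((cs.length : Int) - 1) (-1) (-1)) ((cs.length : Int) - 1)
      = ((cs.reverse.dropWhile (fun c => c == ' ')).length : Int) - 1 := by
  induction cs using List.reverseRecOn with
  | nil =>
    rw [PySem.List.pyRange_neg_one_eq_nil (by norm_num)]
    simp [pvA_loop]
  | append_singleton ys c ih =>
    have hlen : (((ys ++ [c]).length : Int) - 1) = (ys.length : Int) := by
      simp
    rw [hlen, PySem.List.pyRange_neg_one_cons (by omega)]
    have hget : PySem.List.pyGet? (ys ++ [c]) (ys.length : Int) = some c := by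
      rw [PySem.List.pyGet?_of_nonneg _ (by omega)]
      simp
    simp only [pvA_loop, hget]
    have hpred : (fun c => c == ' ') c = (is_space_character c) := by
      simp [beq_space_eq, is_space_character]
    by_cases hs : is_space_character c = true
    · simp only [hs, if_true]
      rw [pvA_loop_append ys c _
        (fun i hi => by
          rw [PySem.List.mem_pyRange_neg_one] at hi
          exact ⟨by omega, by omega⟩)]
      rw [List.reverse_append]
      simp only [List.reverse_cons, List.reverse_nil, List.nil_append, List.cons_append,
        List.dropWhile_cons, hpred, hs, List.nil_append]
      exact ih
    · simp only [hs]
      rw [List.reverse_append]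
      simp only [List.reverse_cons, List.reverse_nil, List.nil_append, List.cons_append,
        List.dropWhile_cons, hpred, hs, List.nil_append]
      simp

-- ===== VERDICT (by name: the statement is the Claim_ definition above) =====
theorem get_first_index_from_the_end_that_isnt_a_space_spec : Claim_equal_get_first_index_from_the_end_that_isnt_a_space := by
  intro A _
  unfold Spec_get_first_index_from_the_end_that_isnt_a_space
  unfold get_first_index_from_the_end_that_isnt_a_space get_first_index_from_the_end_that_isnt_a_space_alt pvB_rstripSpaces
  rw [key]
  simp
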